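-- pv_equiv track=rewrite | github.com/SwierkKlaudia/python | basics/others.py | I1d
-- ===== SOURCE A (Python) =====
-- def I1d(str1):
--     counter = 0
--     max_ctr = 0
--     lst2 = ['-']
--     for i in range(1,len(str1)):
--         if str1[i] != str1[i-1]:
--             if str1[i] == '1':
--                 lst2 += 'r'
--                 counter = 0
--             else:
--                 lst2 += '-'
--                 counter += 1
--         else:
--             lst2 += '-'
--             counter += 1
--         if counter > max_ctr:
--             max_place = i + 1
--             max_ctr = counter
--     lst2[max_place] = 'x'
--     str2 = ''.join(lst2)
--     return str2
-- ===== SOURCE B (Python) =====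
-- def I1d(str1):
--     n = len(str1)
--     marks = ['-'] * n
--     counts = [0] * n
--     last_r = 0
--     for i in range(1, n):
--         if str1[i] == '1' and str1[i-1] != '1':
--             marks[i] = 'r'
--             last_r = i
--         counts[i] = i - last_r
--     best = 0
--     place = None
--     for i in range(1, n):
--         if counts[i] > best:
--             best = counts[i]
--             place = i + 1
--     marks[place] = 'x'
--     return ''.join(marks)
-- ===== Notes on version B (the rewrite author's own statement) =====
-- stated objective: alternative
-- what changed: A's single fused loop (appending markers while tracking counter/max_ctr/max_place in one pass) is split into two independent passes: pass 1 fills preallocated marker and streak-count tables, deriving each count arithmetically as i - last_r from the last transition-to-'1' index instead of an incrementing counter, and pass 2 scans the count table for the first strict maximum to place 'x'.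
-- outside the precondition, e.g. on I1d('1'): A raises UnboundLocalError, B raises TypeError; on I1d('10'): A raises IndexError, B raises IndexError; on I1d('x'): A raises UnboundLocalError, B raises TypeError
import Mathlib
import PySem

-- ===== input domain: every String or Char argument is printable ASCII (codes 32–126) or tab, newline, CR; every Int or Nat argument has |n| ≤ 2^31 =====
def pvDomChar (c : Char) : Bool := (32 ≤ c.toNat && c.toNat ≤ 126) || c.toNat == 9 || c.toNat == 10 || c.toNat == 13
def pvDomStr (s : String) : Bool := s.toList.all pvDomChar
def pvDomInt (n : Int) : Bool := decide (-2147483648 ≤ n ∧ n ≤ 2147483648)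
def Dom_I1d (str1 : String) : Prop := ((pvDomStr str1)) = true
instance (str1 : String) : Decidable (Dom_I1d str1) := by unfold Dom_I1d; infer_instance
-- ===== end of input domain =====

-- B replaces A's fused loop by two passes (marker/streak table via a last-transition index, then a first-strict-argmax scan): a different decomposition, not faster.

-- ===== PORT A =====
-- state: (counter, max_ctr, max_place, lst2); indices from range(1, len) are ≥ 1, so .toNat is exact
def I1d (str1 : String) : String :=
  let l := str1.toList
  let st := (PySem.List.pyRange 1 (l.length : Int) 1).foldl
    (fun (st : Int × Int × Option Int × List Char) i =>
      let (c, lst2) :=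
        if l.getD i.toNat ' ' ≠ l.getD (i.toNat - 1) ' ' then
          if l.getD i.toNat ' ' = '1' then ((0 : Int), st.2.2.2 ++ ['r'])
          else (st.1 + 1, st.2.2.2 ++ ['-'])
        else (st.1 + 1, st.2.2.2 ++ ['-'])
      if c > st.2.1 then (c, c, some (i + 1), lst2) else (c, st.2.1, st.2.2.1, lst2))
    (0, 0, none, ['-'])
  match st.2.2.1 with
  | some p => String.mk (st.2.2.2.set p.toNat 'x')  -- Python raises IndexError when p ≥ len (excluded by Pre_)
  | none => ""                                      -- Python raises UnboundLocalError (unbound max_place) here (excluded by Pre_)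

-- ===== PORT B =====
-- pass 1 state: (marks, last_r, counts); pass 2 state: (best, place)
def I1d_alt (str1 : String) : String :=
  let l := str1.toList
  let p1 := (PySem.List.pyRange 1 (l.length : Int) 1).foldl
    (fun (st : List Char × Int × List Int) i =>
      let (marks, last_r) :=
        if l.getD i.toNat ' ' = '1' ∧ l.getD (i.toNat - 1) ' ' ≠ '1'
        then (st.1.set i.toNat 'r', i) else (st.1, st.2.1)
      (marks, last_r, st.2.2.set i.toNat (i - last_r)))
    (List.replicate l.length '-', 0, List.replicate l.length (0 : Int))
  let p2 := (PySem.List.pyRange 1 (l.length : Int) 1).foldl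
    (fun (st : Int × Option Int) i =>
      if p1.2.2.getD i.toNat 0 > st.1 then (p1.2.2.getD i.toNat 0, some (i + 1)) else st)
    ((0 : Int), (none : Option Int))
  match p2.2 with
  | some p => String.mk (p1.1.set p.toNat 'x')  -- Python raises IndexError when p ≥ len (excluded by Pre_)
  | none => ""                                  -- Python raises TypeError here (marks[None]; excluded by Pre_)

-- ===== PRECONDITION & SPEC =====
-- pvCnt l i = length of the current non-transition-to-'1' streak ending at index i (A's `counter` after step i)
def pvCnt (l : List Char) : Nat → Nat
  | 0 => 0
  | i + 1 => if l.getD (i + 1) ' ' = '1' ∧ l.getD i ' ' ≠ '1' then 0 else pvCnt l i + 1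

-- Pre_ excludes exactly the inputs on which A raises: UnboundLocalError (max_place never assigned) when no streak is positive
-- (counter never exceeds 0), and IndexError when the first longest streak ends at the last
-- character (max_place = len(str1)).  Pre_ says: the first index i attaining the maximal
-- streak value satisfies pvCnt i > 0 and i + 1 < len.
def Pre_I1d (str1 : String) : Prop :=
  ∃ i, i < str1.toList.length ∧ 1 ≤ i ∧ i + 1 < str1.toList.length ∧ 0 < pvCnt str1.toList i ∧
    (∀ j, j < str1.toList.length → pvCnt str1.toList j ≤ pvCnt str1.toList i) ∧
    (∀ j, j < i → pvCnt str1.toList j < pvCnt str1.toList i)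
instance (str1 : String) : Decidable (Pre_I1d str1) := by unfold Pre_I1d; infer_instance

def pvWitness_I1d : String := "1001"

def Spec_I1d (str1 : String) (out : String) : Prop := out = I1d_alt str1
instance (str1 : String) (out : String) : Decidable (Spec_I1d str1 out) := by unfold Spec_I1d; infer_instance

-- ===== CLAIM (what is proved, stated in full; the proofs are below) =====
def Claim_equal_I1d : Prop := ∀ (str1 : String), Dom_I1d str1 → Pre_I1d str1 → Spec_I1d str1 (I1d str1)

-- ===== LEMMAS AND PROOFS =====

-- proof-side spec functions
def pvMark (l : List Char) (i : Nat) : Char :=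
  if l.getD i ' ' = '1' ∧ l.getD (i - 1) ' ' ≠ '1' then 'r' else '-'

def pvMarks (l : List Char) (m : Nat) : List Char := (List.range' 1 m).map (pvMark l)

def pvBest (l : List Char) : Nat → Int × Option Int
  | 0 => (0, none)
  | i + 1 =>
    if (pvCnt l (i + 1) : Int) > (pvBest l i).1
    then ((pvCnt l (i + 1) : Int), some ((i : Int) + 2)) else pvBest l i

theorem pvMarks_succ (l : List Char) (m : Nat) :
    pvMarks l (m + 1) = pvMarks l m ++ [pvMark l (m + 1)] := by
  simp [pvMarks, List.range'_concat, Nat.add_comm]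

theorem pvReplicate_pos {α : Type} (x : α) (n : Nat) (h : 0 < n) :
    List.replicate n x = x :: List.replicate (n - 1) x := by
  cases n with
  | zero => omega
  | succ k => simp [List.replicate_succ]

-- setting the element just past a (k+1)-long prefix
theorem pvSet_mid {α : Type} (a x y : α) (xs : List α) (k r : Nat) (hk : xs.length = k) :
    (a :: (xs ++ List.replicate (r + 1) y)).set (k + 1) x
      = a :: (xs ++ x :: List.replicate r y) := by
  rw [List.set_cons_succ, List.set_append]
  simp [hk, List.replicate_succ]

theorem A_fold (l : List Char) (m : Nat) :
    (PySem.List.pyRange 1 (1 + (m : Int)) 1).foldl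
      (fun (st : Int × Int × Option Int × List Char) i =>
        let (c, lst2) :=
          if l.getD i.toNat ' ' ≠ l.getD (i.toNat - 1) ' ' then
            if l.getD i.toNat ' ' = '1' then ((0 : Int), st.2.2.2 ++ ['r'])
            else (st.1 + 1, st.2.2.2 ++ ['-'])
          else (st.1 + 1, st.2.2.2 ++ ['-'])
        if c > st.2.1 then (c, c, some (i + 1), lst2) else (c, st.2.1, st.2.2.1, lst2))
      (0, 0, none, ['-'])
    = ((pvCnt l m : Int), (pvBest l m).1, (pvBest l m).2, '-' :: pvMarks l m) := by
  induction m with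
  | zero =>
    rw [PySem.List.pyRange_one_eq_nil (by omega)]
    simp [pvCnt, pvBest, pvMarks]
  | succ m ih =>
    have h1 : (1 : Int) + ((m + 1 : Nat) : Int) = (1 + (m : Int)) + 1 := by push_cast; ring
    rw [h1, PySem.List.pyRange_one_succ_right (by omega), List.foldl_append, ih]
    simp only [List.foldl_cons, List.foldl_nil]
    have hi : (1 + (m : Int)).toNat = m + 1 := by omega
    have h2 : ((1 : Int) + (m : Int)) + 1 = ((m : Int) + 2) := by ring
    rw [hi]
    simp only [Nat.add_sub_cancel]
    by_cases hflag : l.getD (m + 1) ' ' = '1' ∧ l.getD m ' ' ≠ '1'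
    · have o1 : l.getD (m + 1) ' ' ≠ l.getD m ' ' := by
        rw [hflag.1]; exact fun h => hflag.2 h.symm
      have hc : pvCnt l (m + 1) = 0 := by
        simp only [pvCnt]; rw [if_pos hflag]
      have hmk : pvMark l (m + 1) = 'r' := by
        simp only [pvMark, Nat.add_sub_cancel]; rw [if_pos hflag]
      rw [if_pos o1, if_pos hflag.1]
      simp only [pvBest, pvMarks_succ, hmk, hc, Nat.cast_zero, h2]
      split_ifs <;> simp [List.cons_append]
    · have hc : pvCnt l (m + 1) = pvCnt l m + 1 := by
        simp only [pvCnt]; rw [if_neg hflag]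
      have hmk : pvMark l (m + 1) = '-' := by
        simp only [pvMark, Nat.add_sub_cancel]; rw [if_neg hflag]
      have hstep : (if l.getD (m + 1) ' ' ≠ l.getD m ' ' then
            if l.getD (m + 1) ' ' = '1' then ((0 : Int), ('-' :: pvMarks l m) ++ ['r'])
            else ((pvCnt l m : Int) + 1, ('-' :: pvMarks l m) ++ ['-'])
          else ((pvCnt l m : Int) + 1, ('-' :: pvMarks l m) ++ ['-']))
          = ((pvCnt l m : Int) + 1, ('-' :: pvMarks l m) ++ ['-']) := by
        split_ifs with o1 o2
        · exact absurd ⟨o2, fun h => o1 (o2.trans h.symm)⟩ hflag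
        · rfl
        · rfl
      rw [hstep]
      simp only [pvBest, pvMarks_succ, hmk, hc, Nat.cast_add, Nat.cast_one, h2]
      split_ifs <;> simp [List.cons_append]

theorem B1_fold (l : List Char) (m : Nat) (hm : m < l.length) :
    (PySem.List.pyRange 1 (1 + (m : Int)) 1).foldl
      (fun (st : List Char × Int × List Int) i =>
        let (marks, last_r) :=
          if l.getD i.toNat ' ' = '1' ∧ l.getD (i.toNat - 1) ' ' ≠ '1'
          then (st.1.set i.toNat 'r', i) else (st.1, st.2.1)
        (marks, last_r, st.2.2.set i.toNat (i - last_r)))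
      (List.replicate l.length '-', 0, List.replicate l.length (0 : Int))
    = ('-' :: pvMarks l m ++ List.replicate (l.length - 1 - m) '-',
       (m : Int) - (pvCnt l m : Int),
       (0 : Int) :: (List.range' 1 m).map (fun i => (pvCnt l i : Int))
         ++ List.replicate (l.length - 1 - m) (0 : Int)) := by
  induction m with
  | zero =>
    rw [PySem.List.pyRange_one_eq_nil (by omega),
        pvReplicate_pos '-' l.length hm, pvReplicate_pos (0 : Int) l.length hm]
    simp [pvCnt, pvMarks]
  | succ m ih =>
    have hm' : m < l.length := by omega
    have h1 : (1 : Int) + ((m + 1 : Nat) : Int) = (1 + (m : Int)) + 1 := by push_cast; ring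
    rw [h1, PySem.List.pyRange_one_succ_right (by omega), List.foldl_append, ih hm']
    simp only [List.foldl_cons, List.foldl_nil]
    have hi : (1 + (m : Int)).toNat = m + 1 := by omega
    have hrep : l.length - 1 - m = (l.length - 1 - (m + 1)) + 1 := by omega
    have hlen1 : (pvMarks l m).length = m := by simp [pvMarks]
    have hlen2 : ((List.range' 1 m).map (fun i => (pvCnt l i : Int))).length = m := by simp
    rw [hi]
    simp only [Nat.add_sub_cancel]
    by_cases hflag : l.getD (m + 1) ' ' = '1' ∧ l.getD m ' ' ≠ '1'
    · have hc : pvCnt l (m + 1) = 0 := by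
        simp only [pvCnt]; rw [if_pos hflag]
      have hmk : pvMark l (m + 1) = 'r' := by
        simp only [pvMark, Nat.add_sub_cancel]; rw [if_pos hflag]
      rw [if_pos hflag]
      show (('-' :: (pvMarks l m ++ List.replicate (l.length - 1 - m) '-')).set (m + 1) 'r',
            (1 + (m : Int)),
            ((0 : Int) :: ((List.range' 1 m).map (fun i => (pvCnt l i : Int))
              ++ List.replicate (l.length - 1 - m) (0 : Int))).set (m + 1)
              ((1 + (m : Int)) - (1 + (m : Int)))) = _
      rw [hrep, pvSet_mid _ _ _ _ _ _ hlen1, pvSet_mid _ _ _ _ _ _ hlen2]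
      refine congrArg₂ _ ?_ (congrArg₂ _ ?_ ?_)
      · rw [pvMarks_succ, hmk]
        simp [List.append_assoc]
      · rw [hc]; push_cast; ring
      · rw [List.range'_concat]
        have : (1 + 1 * m) = m + 1 := by omega
        rw [this]
        simp [hc, List.append_assoc]
    · have hc : pvCnt l (m + 1) = pvCnt l m + 1 := by
        simp only [pvCnt]; rw [if_neg hflag]
      have hmk : pvMark l (m + 1) = '-' := by
        simp only [pvMark, Nat.add_sub_cancel]; rw [if_neg hflag]
      rw [if_neg hflag]
      show ('-' :: (pvMarks l m ++ List.replicate (l.length - 1 - m) '-'),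
            ((m : Int) - (pvCnt l m : Int)),
            ((0 : Int) :: ((List.range' 1 m).map (fun i => (pvCnt l i : Int))
              ++ List.replicate (l.length - 1 - m) (0 : Int))).set (m + 1)
              ((1 + (m : Int)) - ((m : Int) - (pvCnt l m : Int)))) = _
      rw [hrep, pvSet_mid _ _ _ _ _ _ hlen2]
      refine congrArg₂ _ ?_ (congrArg₂ _ ?_ ?_)
      · rw [pvMarks_succ, hmk, List.replicate_succ]
        simp [List.append_assoc]
      · rw [hc]; push_cast; ring
      · rw [List.range'_concat]
        have h3 : (1 + 1 * m) = m + 1 := by omega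
        have h4 : (1 + (m : Int)) - ((m : Int) - (pvCnt l m : Int)) = ((pvCnt l (m + 1) : Nat) : Int) := by
          rw [hc]; push_cast; ring
        rw [h3, h4]
        simp [List.append_assoc]

theorem B2_fold (l : List Char) (cnts : List Int)
    (hc : ∀ j, 1 ≤ j → j < l.length → cnts.getD j 0 = (pvCnt l j : Int))
    (m : Nat) (hm : m < l.length) :
    (PySem.List.pyRange 1 (1 + (m : Int)) 1).foldl
      (fun (st : Int × Option Int) i =>
        if cnts.getD i.toNat 0 > st.1 then (cnts.getD i.toNat 0, some (i + 1)) else st)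
      ((0 : Int), (none : Option Int))
    = pvBest l m := by
  induction m with
  | zero =>
    rw [PySem.List.pyRange_one_eq_nil (by omega)]
    simp [pvBest]
  | succ m ih =>
    have hm' : m < l.length := by omega
    have h1 : (1 : Int) + ((m + 1 : Nat) : Int) = (1 + (m : Int)) + 1 := by push_cast; ring
    rw [h1, PySem.List.pyRange_one_succ_right (by omega), List.foldl_append, ih hm']
    simp only [List.foldl_cons, List.foldl_nil]
    have hi : (1 + (m : Int)).toNat = m + 1 := by omega
    have h2 : ((1 : Int) + (m : Int)) + 1 = ((m : Int) + 2) := by ring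
    rw [hi, hc (m + 1) (by omega) hm]
    simp only [pvBest, h2]

theorem I1d_ports_eq (str1 : String) : I1d str1 = I1d_alt str1 := by
  by_cases h0 : str1.toList.length = 0
  · simp [I1d, I1d_alt, h0, PySem.List.pyRange_one_eq_nil]
  · have hb : ((str1.toList.length : Int)) = 1 + ((str1.toList.length - 1 : Nat) : Int) := by omega
    have hm : str1.toList.length - 1 < str1.toList.length := by omega
    simp only [I1d, I1d_alt, hb]
    rw [A_fold str1.toList (str1.toList.length - 1),
        B1_fold str1.toList (str1.toList.length - 1) hm]
    have hrep0 : str1.toList.length - 1 - (str1.toList.length - 1) = 0 := by omega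
    rw [hrep0]
    simp only [List.replicate, List.append_nil]
    rw [B2_fold str1.toList
        ((0 : Int) :: (List.range' 1 (str1.toList.length - 1)).map (fun i => (pvCnt str1.toList i : Int)))
        (by
          intro j hj1 hj2
          cases j with
          | zero => omega
          | succ k =>
            rw [List.getD_cons_succ]
            rw [List.getD_eq_getElem?_getD, List.getElem?_map,
                List.getElem?_range' (by omega)]
            simp [Nat.add_comm])
        (str1.toList.length - 1) hm]

-- ===== VERDICT (by name: the statement is the Claim_ definition above) =====
theorem I1d_spec : Claim_equal_I1d := by
  intro s _ _
  unfold Spec_I1d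
  exact I1d_ports_eq s
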